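-- pv_equiv track=rewrite | github.com/HitaloM/Azure-TGBot | src/bot/utils/chat/response_processor.py | _split_code_blocks
-- ===== SOURCE A (Python) =====
-- def _split_code_blocks(text: str) -> list[str]:
--     """Split text into segments based on Markdown-style code blocks.
--
--     Separates input text into code blocks (delimited by triple backticks or tildes)
--     and regular text segments, preserving their original order.
--
--     Args:
--         text: Input string potentially containing Markdown code blocks
--
--     Returns:
--         List of strings, each representing either a code block (including delimiters)
--         or a regular text segment
--     """
--     parts: list[str] = []
--     is_code_block = False
--     code_block_buffer: list[str] = []
--     current_buffer: list[str] = []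
--     code_block_delimiter: str | None = None
--
--     for line in text.split("\n"):
--         stripped = line.strip()
--
--         if stripped.startswith(("```", "~~~")):
--             delimiter = stripped[:3]
--
--             if not is_code_block:
--                 if current_buffer:
--                     parts.append("\n".join(current_buffer))
--                     current_buffer = []
--                 code_block_buffer = [line]
--                 is_code_block = True
--                 code_block_delimiter = delimiter
--             elif code_block_delimiter == delimiter:
--                 code_block_buffer.append(line)
--                 parts.append("\n".join(code_block_buffer))
--                 code_block_buffer = []
--                 is_code_block = False
--                 code_block_delimiter = None
--             else:
--                 code_block_buffer.append(line)
--         elif is_code_block: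
--             code_block_buffer.append(line)
--         else:
--             current_buffer.append(line)
--
--     if current_buffer:
--         parts.append("\n".join(current_buffer))
--     if code_block_buffer:
--         parts.append("\n".join(code_block_buffer))
--
--     return parts
-- ===== SOURCE B (Python) =====
-- def _split_code_blocks(text: str) -> list[str]:
--     lines = text.split("\n")
--     n = len(lines)
--     parts: list[str] = []
--     i = 0
--     while i < n:
--         # gather a run of plain text lines
--         buf: list[str] = []
--         while i < n and not lines[i].strip().startswith(("```", "~~~")):
--             buf.append(lines[i])
--             i += 1
--         if buf:
--             parts.append("\n".join(buf))
--         if i == n: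
--             break
--         # open a code block
--         delimiter = lines[i].strip()[:3]
--         code = [lines[i]]
--         i += 1
--         while i < n:
--             line = lines[i]
--             code.append(line)
--             i += 1
--             stripped = line.strip()
--             if stripped.startswith(("```", "~~~")) and stripped[:3] == delimiter:
--                 parts.append("\n".join(code))
--                 code = []
--                 break
--         if code:  # unclosed block at end of input
--             parts.append("\n".join(code))
--     return parts
-- ===== Notes on version B (the rewrite author's own statement) =====
-- stated objective: alternative
-- what changed: Replaces A's single flag-driven state machine (is_code_block flag plus delimiter/buffer state carried through one loop) by an index-driven outer scan over the lines with an explicit nested inner scan per code block.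
import Mathlib
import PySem

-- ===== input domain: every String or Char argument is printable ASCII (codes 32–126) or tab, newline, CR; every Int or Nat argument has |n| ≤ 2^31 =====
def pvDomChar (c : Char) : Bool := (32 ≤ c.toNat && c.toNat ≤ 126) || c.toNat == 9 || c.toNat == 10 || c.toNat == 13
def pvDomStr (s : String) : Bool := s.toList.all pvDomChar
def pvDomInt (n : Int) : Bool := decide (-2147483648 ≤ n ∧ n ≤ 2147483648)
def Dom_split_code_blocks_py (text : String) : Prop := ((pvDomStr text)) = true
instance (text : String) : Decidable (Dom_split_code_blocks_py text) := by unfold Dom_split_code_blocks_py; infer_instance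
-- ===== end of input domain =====

-- B replaces A's flag-driven single state-machine loop by an index-driven outer scan with an
-- explicit inner scan per code block (different decomposition; same values everywhere).

-- ===== PORT A =====
-- shared small helpers: `stripped.startswith(("```","~~~"))` and `stripped[:3]`
def pvIsFence (line : String) : Bool :=
  PySem.Str.startswith (PySem.Str.strip line) "```" || PySem.Str.startswith (PySem.Str.strip line) "~~~"

def pvDelim (line : String) : String :=
  String.ofList (PySem.List.slice (PySem.Str.strip line).toList none (some 3))

-- loop body of A's `for line in text.split("\n")`; state = (parts, is_code_block, code_block_buffer, current_buffer, code_block_delimiter)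
def pvStepA (st : List String × Bool × List String × List String × Option String) (line : String) :
    List String × Bool × List String × List String × Option String :=
  let (parts, isCode, codeBuf, curBuf, delim) := st
  if pvIsFence line then
    let d := pvDelim line
    if !isCode then
      let parts := if curBuf ≠ [] then parts ++ [PySem.Str.join "\n" curBuf] else parts
      (parts, true, [line], [], some d)
    else if delim = some d then
      (parts ++ [PySem.Str.join "\n" (codeBuf ++ [line])], false, [], curBuf, none)
    else
      (parts, isCode, codeBuf ++ [line], curBuf, delim)
  else if isCode then
    (parts, isCode, codeBuf ++ [line], curBuf, delim)
  else
    (parts, isCode, codeBuf, curBuf ++ [line], delim)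

def split_code_blocks_py (text : String) : List String :=
  let lines := ((PySem.Str.split? text "\n").getD [])
  let st := lines.foldl pvStepA ([], false, [], [], none)
  let (parts, _, codeBuf, curBuf, _) := st
  let parts := if curBuf ≠ [] then parts ++ [PySem.Str.join "\n" curBuf] else parts
  if codeBuf ≠ [] then parts ++ [PySem.Str.join "\n" codeBuf] else parts

-- ===== PORT B =====
mutual
-- outer scan: accumulate plain-text lines in `buf`, flush when a fence opens or input ends
def pvBText (lines : List String) (buf : List String) : List String :=
  match lines with
  | [] => if buf ≠ [] then [PySem.Str.join "\n" buf] else []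
  | l :: rest =>
    if pvIsFence l then
      (if buf ≠ [] then [PySem.Str.join "\n" buf] else []) ++ pvBCode (pvDelim l) [l] rest
    else
      pvBText rest (buf ++ [l])

-- inner scan: inside a code block opened by delimiter `d`, collect until a matching fence closes it
def pvBCode (d : String) (code : List String) (lines : List String) : List String :=
  match lines with
  | [] => if code ≠ [] then [PySem.Str.join "\n" code] else []   -- unclosed block at end of input
  | l :: rest =>
    if pvIsFence l ∧ pvDelim l = d then
      PySem.Str.join "\n" (code ++ [l]) :: pvBText rest []
    else
      pvBCode d (code ++ [l]) rest
end

def split_code_blocks_py_alt (text : String) : List String :=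
  pvBText (((PySem.Str.split? text "\n").getD [])) []

-- ===== PRECONDITION & SPEC =====
def Spec_split_code_blocks_py (text : String) (out : List String) : Prop := out = split_code_blocks_py_alt text
instance (text : String) (out : List String) : Decidable (Spec_split_code_blocks_py text out) := by unfold Spec_split_code_blocks_py; infer_instance

-- ===== CLAIM (what is proved, stated in full; the proofs are below) =====
def Claim_equal_split_code_blocks_py : Prop := ∀ (text : String), Dom_split_code_blocks_py text → Spec_split_code_blocks_py text (split_code_blocks_py text)

-- ===== LEMMAS AND PROOFS =====
-- A's final flush, as a function of the loop state
def pvFin (st : List String × Bool × List String × List String × Option String) : List String :=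
  let (parts, _, codeBuf, curBuf, _) := st
  let parts := if curBuf ≠ [] then parts ++ [PySem.Str.join "\n" curBuf] else parts
  if codeBuf ≠ [] then parts ++ [PySem.Str.join "\n" codeBuf] else parts

-- mutual invariant linking A's fold to B's two scans
theorem pvLoopEq (lines : List String) :
    (∀ parts cur, pvFin (lines.foldl pvStepA (parts, false, [], cur, none)) = parts ++ pvBText lines cur)
    ∧ (∀ parts d codeBuf, pvFin (lines.foldl pvStepA (parts, true, codeBuf, [], some d)) = parts ++ pvBCode d codeBuf lines) := by
  induction lines with
  | nil =>
    constructor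
    · intro parts cur
      by_cases h : cur = [] <;> simp [pvFin, pvBText, h]
    · intro parts d codeBuf
      by_cases h : codeBuf = [] <;> simp [pvFin, pvBCode, h]
  | cons l rest ih =>
    constructor
    · intro parts cur
      simp only [List.foldl, pvBText]
      by_cases hf : pvIsFence l
      · simp only [pvStepA, hf, if_pos, Bool.not_false]
        rw [ih.2]
        split_ifs <;> simp
      · simp only [pvStepA, hf, Bool.false_eq_true, if_false]
        rw [ih.1]
    · intro parts d codeBuf
      simp only [List.foldl, pvBCode]
      by_cases hf : pvIsFence l
      · by_cases hd : pvDelim l = d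
        · simp only [pvStepA, hf, hd, if_true, Bool.not_true, Bool.false_eq_true, if_false, and_self]
          rw [ih.1]
          simp
        · have hne : some d ≠ some (pvDelim l) := by simpa [eq_comm] using hd
          simp only [pvStepA, hf, if_true, Bool.not_true, Bool.false_eq_true, if_false, hne, hd, and_false]
          rw [ih.2]
      · simp only [pvStepA, hf, Bool.false_eq_true, if_false, ite_true, false_and]
        rw [ih.2]

-- ===== VERDICT (by name: the statement is the Claim_ definition above) =====
theorem split_code_blocks_py_spec : Claim_equal_split_code_blocks_py := by
  intro text _
  unfold Spec_split_code_blocks_py split_code_blocks_py split_code_blocks_py_alt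
  have h := (pvLoopEq (((PySem.Str.split? text "\n").getD []))).1 [] []
  simpa [pvFin] using h
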